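-- pv_equiv track=rewrite | github.com/NewsAppsUMD/nicar2026 | scripts/filter_relevant_quotes.py | categorize_person
-- ===== SOURCE A (Python) =====
-- HIGHLY_RELEVANT = [
--     'superintendent', 'principal', 'board member', 'board president', 'board chair',
--     'school board', 'director', 'teacher', 'assistant superintendent', 'ceo',
--     'president', 'vice president', 'secretary', 'treasurer'
-- ]
--
-- MODERATELY_RELEVANT = [
--     'coordinator', 'specialist', 'manager', 'supervisor', 'staff', 'employee',
--     'parent', 'student', 'delegate', 'senator', 'commissioner', 'council',
--     'mayor', 'official'
-- ]
--
-- NOT_RELEVANT = [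
--     'architect', 'contractor', 'consultant', 'vendor', 'project manager',
--     'engineer', 'designer', 'attorney', 'lawyer'
-- ]
--
-- def categorize_person(full_name_and_title):
--     """Categorize a person by their title/role"""
--     title_lower = full_name_and_title.lower()
--
--     for keyword in HIGHLY_RELEVANT:
--         if keyword in title_lower:
--             return 'highly_relevant'
--
--     for keyword in MODERATELY_RELEVANT:
--         if keyword in title_lower:
--             return 'moderately_relevant'
--
--     for keyword in NOT_RELEVANT:
--         if keyword in title_lower:
--             return 'not_relevant'
--
--     # If no title info, check if there's a dash (indicating a title was provided)
--     if '—' not in full_name_and_title: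
--         return 'unknown'
--
--     return 'unknown'
-- ===== SOURCE B (Python) =====
-- _RANKED = [
--     ('superintendent', 0), ('principal', 0), ('board member', 0), ('board president', 0),
--     ('board chair', 0), ('school board', 0), ('director', 0), ('teacher', 0),
--     ('assistant superintendent', 0), ('ceo', 0), ('president', 0), ('vice president', 0),
--     ('secretary', 0), ('treasurer', 0),
--     ('coordinator', 1), ('specialist', 1), ('manager', 1), ('supervisor', 1),
--     ('staff', 1), ('employee', 1), ('parent', 1), ('student', 1), ('delegate', 1),
--     ('senator', 1), ('commissioner', 1), ('council', 1), ('mayor', 1), ('official', 1),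
--     ('architect', 2), ('contractor', 2), ('consultant', 2), ('vendor', 2),
--     ('project manager', 2), ('engineer', 2), ('designer', 2), ('attorney', 2), ('lawyer', 2),
-- ]
-- _LABELS = ('highly_relevant', 'moderately_relevant', 'not_relevant', 'unknown')
--
-- def categorize_person(full_name_and_title):
--     """Categorize a person by their title/role"""
--     title_lower = full_name_and_title.lower()
--     best = 3
--     for kw, rank in _RANKED:
--         if rank < best and kw in title_lower:
--             best = rank
--     return _LABELS[best]
-- ===== Notes on version B (the rewrite author's own statement) =====
-- stated objective: alternative
-- what changed: Replaced three short-circuit per-category scans (plus a dead em-dash check) by a single min-rank accumulator pass over one flat (keyword, rank) list with a rank-indexed label tuple.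
import Mathlib
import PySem

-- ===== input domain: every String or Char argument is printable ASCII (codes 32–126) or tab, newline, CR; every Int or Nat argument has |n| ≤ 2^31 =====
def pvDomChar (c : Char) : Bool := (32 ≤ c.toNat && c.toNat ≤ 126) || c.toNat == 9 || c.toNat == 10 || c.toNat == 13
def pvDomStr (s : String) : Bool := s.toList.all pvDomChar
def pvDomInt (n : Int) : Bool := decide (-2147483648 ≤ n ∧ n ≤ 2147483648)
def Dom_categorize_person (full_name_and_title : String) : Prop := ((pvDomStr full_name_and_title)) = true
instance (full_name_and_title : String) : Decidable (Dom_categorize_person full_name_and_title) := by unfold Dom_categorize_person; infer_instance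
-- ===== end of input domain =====

-- B replaces A's three short-circuit category scans by one min-rank accumulator pass over a flat (keyword, rank) list; same cost, different decomposition.

-- ===== PORT A =====
def HIGHLY_RELEVANT : List String := [
  "superintendent", "principal", "board member", "board president", "board chair",
  "school board", "director", "teacher", "assistant superintendent", "ceo",
  "president", "vice president", "secretary", "treasurer"]

def MODERATELY_RELEVANT : List String := [
  "coordinator", "specialist", "manager", "supervisor", "staff", "employee",
  "parent", "student", "delegate", "senator", "commissioner", "council",
  "mayor", "official"]

def NOT_RELEVANT : List String := [
  "architect", "contractor", "consultant", "vendor", "project manager",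
  "engineer", "designer", "attorney", "lawyer"]

def categorize_person (full_name_and_title : String) : String :=
  let title_lower := PySem.Str.lower full_name_and_title
  if HIGHLY_RELEVANT.any (fun keyword => PySem.Str.isIn keyword title_lower) then "highly_relevant"
  else if MODERATELY_RELEVANT.any (fun keyword => PySem.Str.isIn keyword title_lower) then "moderately_relevant"
  else if NOT_RELEVANT.any (fun keyword => PySem.Str.isIn keyword title_lower) then "not_relevant"
  else if ¬ PySem.Str.isIn "—" full_name_and_title then "unknown"
  else "unknown"

-- ===== PORT B =====
def pvRanked : List (String × Nat) := [
  ("superintendent", 0), ("principal", 0), ("board member", 0), ("board president", 0),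
  ("board chair", 0), ("school board", 0), ("director", 0), ("teacher", 0),
  ("assistant superintendent", 0), ("ceo", 0), ("president", 0), ("vice president", 0),
  ("secretary", 0), ("treasurer", 0),
  ("coordinator", 1), ("specialist", 1), ("manager", 1), ("supervisor", 1),
  ("staff", 1), ("employee", 1), ("parent", 1), ("student", 1), ("delegate", 1),
  ("senator", 1), ("commissioner", 1), ("council", 1), ("mayor", 1), ("official", 1),
  ("architect", 2), ("contractor", 2), ("consultant", 2), ("vendor", 2),
  ("project manager", 2), ("engineer", 2), ("designer", 2), ("attorney", 2), ("lawyer", 2)]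

def pvLabels : List String := ["highly_relevant", "moderately_relevant", "not_relevant", "unknown"]

def categorize_person_alt (full_name_and_title : String) : String :=
  let title_lower := PySem.Str.lower full_name_and_title
  let best : Nat := pvRanked.foldl
    (fun acc p => if p.2 < acc ∧ PySem.Str.isIn p.1 title_lower = true then p.2 else acc) 3
  PySem.List.pyGetD pvLabels (best : Int) ""

-- ===== PRECONDITION & SPEC =====
def Spec_categorize_person (full_name_and_title : String) (out : String) : Prop := out = categorize_person_alt full_name_and_title
instance (full_name_and_title : String) (out : String) : Decidable (Spec_categorize_person full_name_and_title out) := by unfold Spec_categorize_person; infer_instance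

-- ===== CLAIM (what is proved, stated in full; the proofs are below) =====
def Claim_equal_categorize_person : Prop := ∀ (full_name_and_title : String), Dom_categorize_person full_name_and_title → Spec_categorize_person full_name_and_title (categorize_person full_name_and_title)

-- ===== LEMMAS AND PROOFS =====

/-- One constant-rank segment of B's accumulator loop collapses to a single `any` test. -/
theorem foldl_constRank (t : String) (L : List String) (r acc : Nat) :
    (L.map (fun k => (k, r))).foldl
      (fun acc p => if p.2 < acc ∧ PySem.Str.isIn p.1 t = true then p.2 else acc) acc
    = if r < acc ∧ L.any (fun k => PySem.Str.isIn k t) = true then r else acc := by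
  induction L generalizing acc with
  | nil => simp only [List.map_nil, List.foldl_nil, List.any_nil, Bool.false_eq_true,
      and_false, if_false]
  | cons k L ih =>
    simp only [List.map_cons, List.foldl_cons, List.any_cons, Bool.or_eq_true]
    rw [ih]
    by_cases hk : PySem.Str.isIn k t = true
    · split_ifs <;> first | rfl | omega | tauto
    · split_ifs <;> first | rfl | omega | tauto

theorem pvRanked_eq :
    pvRanked = HIGHLY_RELEVANT.map (fun k => (k, 0))
      ++ MODERATELY_RELEVANT.map (fun k => (k, 1))
      ++ NOT_RELEVANT.map (fun k => (k, 2)) := by rfl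

-- ===== VERDICT (by name: the statement is the Claim_ definition above) =====
theorem categorize_person_spec : Claim_equal_categorize_person := by
  intro s _
  unfold Spec_categorize_person categorize_person categorize_person_alt
  rw [pvRanked_eq]
  simp only [List.foldl_append, foldl_constRank]
  by_cases h0 : HIGHLY_RELEVANT.any (fun keyword => PySem.Str.isIn keyword (PySem.Str.lower s)) = true <;>
  by_cases h1 : MODERATELY_RELEVANT.any (fun keyword => PySem.Str.isIn keyword (PySem.Str.lower s)) = true <;>
  by_cases h2 : NOT_RELEVANT.any (fun keyword => PySem.Str.isIn keyword (PySem.Str.lower s)) = true <;>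
  simp only [Bool.not_eq_true] at h0 h1 h2 <;>
  simp only [h0, h1, h2] <;> norm_num <;> rfl
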